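-- pv_equiv track=rewrite | github.com/groupsum/ssot-registry | pkgs/ssot-core/src/ssot_registry/guards/profile_requirements.py | resolve_profile_ids_transitively
-- ===== SOURCE A (Python) =====
-- from typing import Any
--
-- def resolve_profile_ids_transitively(
--     profile_id: str,
--     index: dict[str, dict[str, dict[str, Any]]],
-- ) -> tuple[list[str], list[str]]:
--     resolved: list[str] = []
--     failures: list[str] = []
--     seen: set[str] = set()
--
--     def visit(current_profile_id: str, stack: list[str]) -> None:
--         if current_profile_id in stack:
--             cycle = " -> ".join(stack + [current_profile_id])
--             failures.append(f"Profile requirement cycle detected: {cycle}")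
--             return
--         profile = index["profiles"].get(current_profile_id)
--         if profile is None:
--             failures.append(f"Missing profile {current_profile_id}")
--             return
--         for nested_profile_id in profile.get("profile_ids", []):
--             if nested_profile_id not in index["profiles"]:
--                 failures.append(f"Profile {current_profile_id} requires missing profile {nested_profile_id}")
--                 continue
--             if nested_profile_id not in seen:
--                 seen.add(nested_profile_id)
--                 resolved.append(nested_profile_id)
--             visit(nested_profile_id, stack + [current_profile_id])
--
--     visit(profile_id, [])
--     return resolved, sorted(set(failures))
-- ===== SOURCE B (Python) =====
-- def resolve_profile_ids_transitively(
--     profile_id,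
--     index,
-- ):
--     profiles = index["profiles"]
--     resolved = []
--     failures = []
--     seen = set()
--
--     stack = [(profile_id, [])]
--     while stack:
--         node, path = stack.pop()
--         if path:
--             # A non-root frame: its parent is path[-1].
--             if node not in profiles:
--                 failures.append(f"Profile {path[-1]} requires missing profile {node}")
--                 continue
--             if node not in seen:
--                 seen.add(node)
--                 resolved.append(node)
--         if node in path:
--             cycle = " -> ".join(path + [node])
--             failures.append(f"Profile requirement cycle detected: {cycle}")
--             continue
--         profile = profiles.get(node)
--         if profile is None:
--             failures.append(f"Missing profile {node}")
--             continue
--         new_path = path + [node]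
--         for child in reversed(profile.get("profile_ids", [])):
--             stack.append((child, new_path))
--
--     return resolved, sorted(set(failures))
-- ===== Notes on version B (the rewrite author's own statement) =====
-- stated objective: alternative
-- what changed: Replaces the recursive closure-based `visit` (mutating outer lists) with an iterative depth-first traversal over an explicit stack of (node, path) frames, doing the seen/resolved and missing/cycle checks at pop time and pushing children in reverse order.
import Mathlib
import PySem

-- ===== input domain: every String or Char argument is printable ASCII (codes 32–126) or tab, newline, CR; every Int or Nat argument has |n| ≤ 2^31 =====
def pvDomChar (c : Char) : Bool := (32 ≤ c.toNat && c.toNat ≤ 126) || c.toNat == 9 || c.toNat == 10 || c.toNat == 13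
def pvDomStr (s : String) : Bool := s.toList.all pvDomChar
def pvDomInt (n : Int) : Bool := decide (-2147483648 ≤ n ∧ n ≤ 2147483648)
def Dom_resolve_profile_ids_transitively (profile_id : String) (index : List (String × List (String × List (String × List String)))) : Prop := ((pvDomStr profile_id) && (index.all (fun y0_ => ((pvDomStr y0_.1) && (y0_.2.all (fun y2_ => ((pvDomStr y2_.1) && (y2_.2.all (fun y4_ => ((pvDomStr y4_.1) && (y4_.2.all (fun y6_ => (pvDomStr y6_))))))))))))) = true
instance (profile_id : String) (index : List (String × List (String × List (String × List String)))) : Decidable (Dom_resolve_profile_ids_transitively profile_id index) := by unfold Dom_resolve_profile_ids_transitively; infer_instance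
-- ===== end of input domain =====

-- B replaces A's recursive closure-based `visit` with an iterative DFS over an explicit stack of
-- (node, path) frames (same traversal and return value, a different decomposition; not claimed faster).
-- ===== PORT A =====
-- A-side helpers: termination measure for the recursive `visit` (keys of `p` not yet on the stack).
def pvKeysNotIn (p : List (String × List (String × List String))) (stack : List String) : Nat :=
  ((p.map Prod.fst).filter (fun x => !(stack.contains x))).length

theorem pvLengthFilterMono {α : Type} (l : List α) (f g : α → Bool)
    (himp : ∀ x, g x = true → f x = true) : (l.filter g).length ≤ (l.filter f).length := by
  induction l with
  | nil => simp
  | cons a l ih =>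
    simp only [List.filter_cons]
    by_cases hg : g a = true
    · simp [hg, himp a hg]; omega
    · by_cases hf : f a = true <;>
        simp [hg, hf] <;> omega

theorem pvLengthFilterLt {α : Type} (l : List α) (f g : α → Bool)
    (himp : ∀ x, g x = true → f x = true) (c : α) (hc : c ∈ l)
    (hg : g c = false) (hf : f c = true) : (l.filter g).length < (l.filter f).length := by
  induction l with
  | nil => simp at hc
  | cons a l ih =>
    simp only [List.filter_cons]
    rcases List.mem_cons.mp hc with rfl | ha
    · simp only [hg, hf, if_true, if_false, Bool.false_eq_true, List.length_cons]
      have := pvLengthFilterMono l f g himp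
      omega
    · by_cases hga : g a = true
      · simp [hga, himp a hga, ih ha]
      · by_cases hfa : f a = true
        · simp only [hga, hfa, if_true, if_false, Bool.false_eq_true, List.length_cons]
          have := ih ha
          omega
        · simp only [hga, hfa, if_false, Bool.false_eq_true]
          exact ih ha

theorem pvKeysNotIn_append_lt (p : List (String × List (String × List String))) (stack : List String)
    (cur : String) (hmem : cur ∈ p.map Prod.fst) (hnot : cur ∉ stack) :
    pvKeysNotIn p (stack ++ [cur]) < pvKeysNotIn p stack := by
  unfold pvKeysNotIn
  refine pvLengthFilterLt _ _ _ ?himp cur hmem ?hg ?hf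
  case hg => simp
  case hf => simpa using hnot
  case himp =>
    intro x
    simp only [List.contains_eq_mem, List.mem_append, List.mem_singleton, Bool.not_eq_true',
      decide_eq_false_iff_not, not_or]
    exact fun h => h.1

mutual
-- `visit(current_profile_id, stack)` of A, with the three mutated locals threaded as state
-- st = (resolved, seen, failures).
def pvVisitA (p : List (String × List (String × List String))) (cur : String) (stack : List String)
    (st : List String × PySem.Set String × List String) :
    List String × PySem.Set String × List String :=
  if hcyc : stack.contains cur then
    (st.1, st.2.1, st.2.2 ++ ["Profile requirement cycle detected: " ++ PySem.Str.join " -> " (stack ++ [cur])])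
  else
    match hget : (PySem.Dict.mk p).get? cur with
    | none => (st.1, st.2.1, st.2.2 ++ ["Missing profile " ++ cur])
    | some profile => pvChildrenA p ((PySem.Dict.mk profile).getD "profile_ids" []) cur stack st
termination_by (pvKeysNotIn p stack, 0, 0)
decreasing_by
  apply Prod.Lex.left
  apply pvKeysNotIn_append_lt
  · have h : (cur, profile) ∈ p := by
      simpa [PySem.Dict.items] using PySem.Dict.mem_items_of_get?_eq_some (PySem.Dict.mk p) hget
    exact List.mem_map.mpr ⟨(cur, profile), h, rfl⟩
  · simpa using hcyc

-- the `for nested_profile_id in profile.get("profile_ids", [])` loop of `visit`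
def pvChildrenA (p : List (String × List (String × List String))) (children : List String)
    (cur : String) (stack : List String)
    (st : List String × PySem.Set String × List String) :
    List String × PySem.Set String × List String :=
  match children with
  | [] => st
  | c :: rest =>
    let st1 :=
      if (PySem.Dict.mk p).contains c = false then
        (st.1, st.2.1, st.2.2 ++ ["Profile " ++ cur ++ " requires missing profile " ++ c])
      else
        pvVisitA p c (stack ++ [cur])
          (if PySem.Set.contains st.2.1 c then st else (st.1 ++ [c], PySem.Set.add st.2.1 c, st.2.2))
    pvChildrenA p rest cur stack st1
termination_by (pvKeysNotIn p (stack ++ [cur]), 1, children.length)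
decreasing_by
  · apply Prod.Lex.right; apply Prod.Lex.left; omega
  · apply Prod.Lex.right; apply Prod.Lex.right; simp
end

def resolve_profile_ids_transitively (profile_id : String) (index : List (String × List (String × List (String × List String)))) : List String × List String :=
  let profiles := (PySem.Dict.mk index).getD "profiles" []   -- index["profiles"]; Pre_ guards the KeyError
  let st := pvVisitA profiles profile_id [] ([], PySem.Set.empty, [])
  (st.1, PySem.List.sorted (PySem.Set.ofList st.2.2) (fun x => x) false)

-- ===== PORT B =====
-- B-side helpers: one pop step, and the measure justifying termination of the frame loop.
def pvMaxChildren (p : List (String × List (String × List String))) : Nat :=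
  p.foldl (fun m e => max m ((PySem.Dict.mk e.2).getD "profile_ids" []).length) 0

def pvMeasB (p : List (String × List (String × List String))) (frames : List (String × List String)) : Nat :=
  (frames.map (fun f => (pvMaxChildren p + 1) ^ pvKeysNotIn p f.2)).sum

-- body of one `while stack:` iteration after the pop, up to the push of children:
-- `.inl st'` = the `continue` paths, `.inr (children, st')` = push `children` with path ++ [node].
def pvPop2 (p : List (String × List (String × List String))) (node : String) (path : List String)
    (st : List String × PySem.Set String × List String) :
    (List String × PySem.Set String × List String) ⊕ (List String × (List String × PySem.Set String × List String)) :=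
  if path.contains node then
    .inl (st.1, st.2.1, st.2.2 ++ ["Profile requirement cycle detected: " ++ PySem.Str.join " -> " (path ++ [node])])
  else
    match (PySem.Dict.mk p).get? node with
    | none => .inl (st.1, st.2.1, st.2.2 ++ ["Missing profile " ++ node])
    | some profile => .inr ((PySem.Dict.mk profile).getD "profile_ids" [], st)

def pvPop (p : List (String × List (String × List String))) (node : String) (path : List String)
    (st : List String × PySem.Set String × List String) :
    (List String × PySem.Set String × List String) ⊕ (List String × (List String × PySem.Set String × List String)) :=
  if hne : path ≠ [] then
    if (PySem.Dict.mk p).contains node = false then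
      .inl (st.1, st.2.1, st.2.2 ++ ["Profile " ++ path.getLast hne ++ " requires missing profile " ++ node])
    else
      pvPop2 p node path
        (if PySem.Set.contains st.2.1 node then st else (st.1 ++ [node], PySem.Set.add st.2.1 node, st.2.2))
  else pvPop2 p node path st

theorem pvPop2_inr (p : List (String × List (String × List String))) (node : String) (path : List String)
    (st : List String × PySem.Set String × List String) (children : List String)
    (st' : List String × PySem.Set String × List String)
    (h : pvPop2 p node path st = .inr (children, st')) :
    node ∉ path ∧ node ∈ p.map Prod.fst ∧ children.length ≤ pvMaxChildren p := by
  unfold pvPop2 at h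
  split_ifs at h with hcyc
  rcases hget : (PySem.Dict.mk p).get? node with _ | profile <;> rw [hget] at h
  · simp at h
  · simp only [Sum.inr.injEq, Prod.mk.injEq] at h
    have hmem : (node, profile) ∈ p := by
      simpa [PySem.Dict.items] using PySem.Dict.mem_items_of_get?_eq_some (PySem.Dict.mk p) hget
    refine ⟨by simpa using hcyc, List.mem_map.mpr ⟨(node, profile), hmem, rfl⟩, ?_⟩
    rw [← h.1]
    exact (PySem.List.le_foldl_max_nat p (fun e => ((PySem.Dict.mk e.2).getD "profile_ids" []).length) 0).2
      (node, profile) hmem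

theorem pvPop_inr (p : List (String × List (String × List String))) (node : String) (path : List String)
    (st : List String × PySem.Set String × List String) (children : List String)
    (st' : List String × PySem.Set String × List String)
    (h : pvPop p node path st = .inr (children, st')) :
    node ∉ path ∧ node ∈ p.map Prod.fst ∧ children.length ≤ pvMaxChildren p := by
  unfold pvPop at h
  split_ifs at h
  all_goals exact pvPop2_inr _ _ _ _ _ _ h

theorem pvMeasB_push_lt (p : List (String × List (String × List String))) (node : String)
    (path : List String) (children : List String) (rest : List (String × List String))
    (hnot : node ∉ path) (hmem : node ∈ p.map Prod.fst) (hlen : children.length ≤ pvMaxChildren p) :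
    pvMeasB p (children.map (fun c => (c, path ++ [node])) ++ rest) < pvMeasB p ((node, path) :: rest) := by
  unfold pvMeasB
  rw [List.map_append, List.sum_append, List.map_map]
  simp only [List.map_cons, List.sum_cons, Function.comp_def]
  have hN := pvKeysNotIn_append_lt p path node hmem hnot
  have hrep : (children.map (fun c => (pvMaxChildren p + 1) ^ pvKeysNotIn p (path ++ [node]))).sum
      = children.length * (pvMaxChildren p + 1) ^ pvKeysNotIn p (path ++ [node]) := by
    induction children with
    | nil => simp
    | cons c cs ih => simp; ring
  rw [hrep]
  have hkey : children.length * (pvMaxChildren p + 1) ^ pvKeysNotIn p (path ++ [node])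
      < (pvMaxChildren p + 1) ^ pvKeysNotIn p path := by
    calc children.length * (pvMaxChildren p + 1) ^ pvKeysNotIn p (path ++ [node])
        ≤ pvMaxChildren p * (pvMaxChildren p + 1) ^ pvKeysNotIn p (path ++ [node]) :=
          Nat.mul_le_mul_right _ hlen
      _ < (pvMaxChildren p + 1) * (pvMaxChildren p + 1) ^ pvKeysNotIn p (path ++ [node]) :=
          Nat.mul_lt_mul_of_lt_of_le (Nat.lt_succ_self _) (Nat.le_refl _) (Nat.pow_pos (Nat.succ_pos _))
      _ = (pvMaxChildren p + 1) ^ (pvKeysNotIn p (path ++ [node]) + 1) := by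
          rw [pow_succ]; ring
      _ ≤ (pvMaxChildren p + 1) ^ pvKeysNotIn p path :=
          Nat.pow_le_pow_right (Nat.succ_pos _) (by omega)

  omega

theorem pvMeasB_cons_lt (p : List (String × List (String × List String))) (fr : String × List String)
    (rest : List (String × List String)) : pvMeasB p rest < pvMeasB p (fr :: rest) := by
  have h : 0 < (pvMaxChildren p + 1) ^ pvKeysNotIn p fr.2 := Nat.pow_pos (Nat.succ_pos _)
  unfold pvMeasB
  simp only [List.map_cons, List.sum_cons]
  omega

theorem pvPushFold (q : List String) (children : List String) (rest : List (String × List String)) :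
    children.reverse.foldl (fun acc c => (c, q) :: acc) rest
      = children.map (fun c => (c, q)) ++ rest := by
  rw [List.foldl_reverse]
  induction children with
  | nil => rfl
  | cons c cs ih => simp [ih]

-- the `while stack:` loop; frames are the stack, head = top.
def pvLoopB (p : List (String × List (String × List String))) (frames : List (String × List String))
    (st : List String × PySem.Set String × List String) :
    List String × PySem.Set String × List String :=
  match frames with
  | [] => st
  | (node, path) :: rest =>
    match hstep : pvPop p node path st with
    | .inl st' => pvLoopB p rest st'
    | .inr (children, st') =>
      pvLoopB p (children.reverse.foldl (fun acc c => (c, path ++ [node]) :: acc) rest) st'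
termination_by pvMeasB p frames
decreasing_by
  · exact pvMeasB_cons_lt p (node, path) rest
  · have h := pvPop_inr p node path st children st' hstep
    rw [pvPushFold]
    exact pvMeasB_push_lt p node path children rest h.1 h.2.1 h.2.2

def resolve_profile_ids_transitively_alt (profile_id : String) (index : List (String × List (String × List (String × List String)))) : List String × List String :=
  let profiles := (PySem.Dict.mk index).getD "profiles" []   -- index["profiles"]; Pre_ guards the KeyError
  let st := pvLoopB profiles [(profile_id, [])] ([], PySem.Set.empty, [])
  (st.1, PySem.List.sorted (PySem.Set.ofList st.2.2) (fun x => x) false)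

-- ===== PRECONDITION & SPEC =====
-- Pre_ excludes exactly the inputs where Python A raises KeyError: an index dict with no "profiles" key.
def Pre_resolve_profile_ids_transitively (profile_id : String) (index : List (String × List (String × List (String × List String)))) : Prop :=
  (PySem.Dict.mk index).contains "profiles" = true
instance (profile_id : String) (index : List (String × List (String × List (String × List String)))) : Decidable (Pre_resolve_profile_ids_transitively profile_id index) := by unfold Pre_resolve_profile_ids_transitively; infer_instance
def pvWitness_resolve_profile_ids_transitively : String × (List (String × List (String × List (String × List String)))) :=
  ("a", [("profiles", [("a", [("profile_ids", ["b", "c"])]), ("b", [("profile_ids", ["a"])])])])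
def Spec_resolve_profile_ids_transitively (profile_id : String) (index : List (String × List (String × List (String × List String)))) (out : List String × List String) : Prop := out = resolve_profile_ids_transitively_alt profile_id index
instance (profile_id : String) (index : List (String × List (String × List (String × List String)))) (out : List String × List String) : Decidable (Spec_resolve_profile_ids_transitively profile_id index out) := by unfold Spec_resolve_profile_ids_transitively; infer_instance

-- ===== CLAIM (what is proved, stated in full; the proofs are below) =====
def Claim_equal_resolve_profile_ids_transitively : Prop := ∀ (profile_id : String) (index : List (String × List (String × List (String × List String)))), Dom_resolve_profile_ids_transitively profile_id index → Pre_resolve_profile_ids_transitively profile_id index → Spec_resolve_profile_ids_transitively profile_id index (resolve_profile_ids_transitively profile_id index)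

-- ===== LEMMAS AND PROOFS =====
-- One frame of B, expressed through A's `visit`: a non-root frame is A's per-child unit
-- (missing-child check, seen/resolved add, then visit); the root frame is just visit.
def pvStepU (p : List (String × List (String × List String)))
    (st : List String × PySem.Set String × List String) (fr : String × List String) :
    List String × PySem.Set String × List String :=
  if hne : fr.2 ≠ [] then
    if (PySem.Dict.mk p).contains fr.1 = false then
      (st.1, st.2.1, st.2.2 ++ ["Profile " ++ fr.2.getLast hne ++ " requires missing profile " ++ fr.1])
    else
      pvVisitA p fr.1 fr.2
        (if PySem.Set.contains st.2.1 fr.1 then st else (st.1 ++ [fr.1], PySem.Set.add st.2.1 fr.1, st.2.2))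
  else pvVisitA p fr.1 fr.2 st

theorem pvChildrenA_eq_foldl (p : List (String × List (String × List String))) (children : List String)
    (cur : String) (stack : List String) (st : List String × PySem.Set String × List String) :
    pvChildrenA p children cur stack st
      = (children.map (fun c => (c, stack ++ [cur]))).foldl (pvStepU p) st := by
  induction children generalizing st with
  | nil => rw [pvChildrenA]; simp
  | cons c rest ih =>
    rw [pvChildrenA, List.map_cons, List.foldl_cons, ih]
    congr 1
    have hne : stack ++ [cur] ≠ [] := by simp
    unfold pvStepU
    rw [dif_pos hne]
    have hlast : (stack ++ [cur]).getLast hne = cur := List.getLast_concat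
    rw [hlast]

-- pvPop agrees with pvStepU: the continue paths return the same state, the push path
-- continues as A's children loop.
theorem pvPop2_vs_visitA (p : List (String × List (String × List String))) (node : String)
    (path : List String) (st : List String × PySem.Set String × List String) :
    (∀ st', pvPop2 p node path st = .inl st' → pvVisitA p node path st = st')
    ∧ (∀ children st', pvPop2 p node path st = .inr (children, st') →
        pvVisitA p node path st = pvChildrenA p children node path st') := by
  unfold pvPop2
  rw [pvVisitA]
  by_cases hcyc : path.contains node
  · rw [if_pos hcyc, dif_pos hcyc]
    constructor
    · intro st' h
      simpa using h
    · intro children st' h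
      simp at h
  · rw [if_neg hcyc, dif_neg hcyc]
    rcases hget : (PySem.Dict.mk p).get? node with _ | profile
    · constructor
      · intro st' h
        simpa using h
      · intro children st' h
        simp at h
    · constructor
      · intro st' h
        simp at h
      · intro children st' h
        simp only [Sum.inr.injEq, Prod.mk.injEq] at h
        rw [← h.1, ← h.2]

theorem pvPop_vs_stepU (p : List (String × List (String × List String))) (node : String)
    (path : List String) (st : List String × PySem.Set String × List String) :
    (∀ st', pvPop p node path st = .inl st' → pvStepU p st (node, path) = st')
    ∧ (∀ children st', pvPop p node path st = .inr (children, st') →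
        pvStepU p st (node, path) = pvChildrenA p children node path st') := by
  unfold pvPop pvStepU
  by_cases hne : path ≠ []
  · rw [dif_pos hne, dif_pos hne]
    by_cases hcon : (PySem.Dict.mk p).contains node = false
    · rw [if_pos hcon, if_pos hcon]
      constructor
      · intro st' h
        simpa using h
      · intro children st' h
        simp at h
    · rw [if_neg hcon, if_neg hcon]
      exact pvPop2_vs_visitA p node path _
  · rw [dif_neg hne, dif_neg hne]
    exact pvPop2_vs_visitA p node path st

theorem pvLoopB_eq_foldl (p : List (String × List (String × List String))) :
    ∀ (frames : List (String × List String)) (st : List String × PySem.Set String × List String),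
      pvLoopB p frames st = frames.foldl (pvStepU p) st := by
  intro frames
  induction hn : pvMeasB p frames using Nat.strong_induction_on generalizing frames with
  | _ n ih =>
  match frames with
  | [] => intro st; rw [pvLoopB, List.foldl_nil]
  | (node, path) :: rest =>
    intro st
    rw [pvLoopB, List.foldl_cons]
    cases hstep : pvPop p node path st with
    | inl st' =>
      simp only []
      rw [(pvPop_vs_stepU p node path st).1 st' hstep]
      exact ih _ (hn ▸ pvMeasB_cons_lt p (node, path) rest) rest rfl st'
    | inr c =>
      obtain ⟨children, st'⟩ := c
      simp only []
      rw [(pvPop_vs_stepU p node path st).2 children st' hstep, pvPushFold]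
      have hlt : pvMeasB p (children.map (fun c => (c, path ++ [node])) ++ rest) < n := by
        have h := pvPop_inr p node path st children st' hstep
        exact hn ▸ pvMeasB_push_lt p node path children rest h.1 h.2.1 h.2.2
      rw [ih _ hlt _ rfl st', List.foldl_append, pvChildrenA_eq_foldl]

-- ===== VERDICT (by name: the statement is the Claim_ definition above) =====
theorem resolve_profile_ids_transitively_spec : Claim_equal_resolve_profile_ids_transitively := by
  intro profile_id index _ _
  unfold Spec_resolve_profile_ids_transitively resolve_profile_ids_transitively resolve_profile_ids_transitively_alt
  simp only [pvLoopB_eq_foldl, List.foldl_cons, List.foldl_nil, pvStepU]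
  simp
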